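-- pv_equiv track=rewrite | github.com/0mer-Ashraf-ML/aws-ui-gym-harness | backend/app/services/task_runners/task_verification.py | _generate_verify_endpoint_comments
-- ===== SOURCE A (Python) =====
-- from typing import Dict, List, Any, Optional
--
-- def _generate_verify_endpoint_comments(assertions: List[Dict]) -> str:
--     """Generate verification comments for verify endpoint assertions (which already have titles)"""
--     if not assertions:
--         return ''
--
--     # Check if all assertions pass
--     all_passed = all(assertion.get('result') == 'pass' for assertion in assertions)
--
--     if all_passed:
--         return f'All {len(assertions)} assertions passed'
--
--     # Generate detailed comments for failed assertions
--     failed_comments = []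
--
--     for assertion in assertions:
--         if assertion.get('result') != 'pass':
--             # Use title directly from the assertion
--             title = assertion.get('title', 'Unknown assertion')
--
--             # Check if there's an error
--             if assertion.get('error'):
--                 comment = f"{title} -- error: {assertion['error']}"
--             else:
--                 # Format: title -- expected value: {expected} and actual value: {actual}
--                 expected_val = assertion.get('expected', 'N/A')
--                 actual_val = assertion.get('actual', 'N/A')
--                 comment = f"{title} -- expected value: {expected_val} and actual value: {actual_val}"
--
--             failed_comments.append(comment)
--
--     # Join failed comments with line breaks
--     return '\n\n'.join(failed_comments)
-- ===== SOURCE B (Python) =====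
-- from typing import Dict, List, Any, Optional
--
--
-- def _join_failed(assertions: List[Dict]) -> Optional[str]:
--     """Divide and conquer: the '\n\n'-joined failure report of this slice,
--     or None if it contains no failing assertion."""
--     if not assertions:
--         return None
--     if len(assertions) == 1:
--         a = assertions[0]
--         if a.get('result') == 'pass':
--             return None
--         title = a.get('title', 'Unknown assertion')
--         if a.get('error'):
--             return f"{title} -- error: {a['error']}"
--         return (f"{title} -- expected value: {a.get('expected', 'N/A')}"
--                 f" and actual value: {a.get('actual', 'N/A')}")
--     mid = len(assertions) // 2
--     left = _join_failed(assertions[:mid])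
--     right = _join_failed(assertions[mid:])
--     if left is None:
--         return right
--     if right is None:
--         return left
--     return left + '\n\n' + right
--
--
-- def _generate_verify_endpoint_comments(assertions: List[Dict]) -> str:
--     if not assertions:
--         return ''
--     joined = _join_failed(assertions)
--     if joined is None:
--         return f'All {len(assertions)} assertions passed'
--     return joined
-- ===== Notes on version B (the rewrite author's own statement) =====
-- stated objective: alternative
-- what changed: Replaces A's all(...) pre-scan plus forward accumulate-into-a-list-then-join loop by a divide-and-conquer recursion that splits the assertion list in half and merges each half's Optional '\n\n'-joined failure report (None = no failures), with no pre-scan, no intermediate list and no final join.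
import Mathlib
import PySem

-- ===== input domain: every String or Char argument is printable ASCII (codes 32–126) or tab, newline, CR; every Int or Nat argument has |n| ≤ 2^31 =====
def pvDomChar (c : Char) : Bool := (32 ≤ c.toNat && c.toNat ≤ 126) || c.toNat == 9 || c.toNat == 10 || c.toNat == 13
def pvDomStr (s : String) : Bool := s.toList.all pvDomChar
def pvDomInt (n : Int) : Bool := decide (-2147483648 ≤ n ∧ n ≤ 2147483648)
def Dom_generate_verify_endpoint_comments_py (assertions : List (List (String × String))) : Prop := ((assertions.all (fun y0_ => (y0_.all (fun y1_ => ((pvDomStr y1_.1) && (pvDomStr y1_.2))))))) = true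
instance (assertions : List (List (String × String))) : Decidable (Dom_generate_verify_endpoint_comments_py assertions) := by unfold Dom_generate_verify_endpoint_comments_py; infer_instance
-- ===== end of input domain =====

-- B replaces A's all(...) pre-scan plus accumulate-then-join loop with a divide-and-conquer
-- recursion merging Optional joined failure reports of the two halves (objective: alternative).


-- ===== PORT A =====
-- dicts are association lists; assertion.get(k) = first match = List.lookup k
def generate_verify_endpoint_comments_py (assertions : List (List (String × String))) : String :=
  if assertions = [] then "" else
  let all_passed := assertions.all (fun assertion => List.lookup "result" assertion == some "pass")
  if all_passed then
    "All " ++ PySem.Int.toStr (assertions.length : Int) ++ " assertions passed"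
  else
    -- for assertion in assertions: if result != 'pass': append the formatted comment
    let failed_comments := assertions.foldl (fun acc assertion =>
      if !(List.lookup "result" assertion == some "pass") then
        acc ++ [let title := (List.lookup "title" assertion).getD "Unknown assertion"
                -- assertion.get('error') is truthy iff present and non-empty
                if (List.lookup "error" assertion).getD "" ≠ "" then
                  title ++ " -- error: " ++ (List.lookup "error" assertion).getD ""
                else
                  title ++ " -- expected value: " ++ (List.lookup "expected" assertion).getD "N/A"
                        ++ " and actual value: " ++ (List.lookup "actual" assertion).getD "N/A"]
      else acc) []
    PySem.Str.join "\n\n" failed_comments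

-- ===== PORT B =====
-- _join_failed: divide and conquer; xs[:mid] / xs[mid:] with 0 ≤ mid ≤ len are take/drop (exact here)
def pvJoinFailed : List (List (String × String)) → Option String
  | [] => none
  | [a] =>
    if List.lookup "result" a == some "pass" then none
    else
      let title := (List.lookup "title" a).getD "Unknown assertion"
      if (List.lookup "error" a).getD "" ≠ "" then
        some (title ++ " -- error: " ++ (List.lookup "error" a).getD "")
      else
        some (title ++ " -- expected value: " ++ (List.lookup "expected" a).getD "N/A"
                    ++ " and actual value: " ++ (List.lookup "actual" a).getD "N/A")
  | x :: y :: rest =>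
    let mid := (x :: y :: rest).length / 2
    let left := pvJoinFailed ((x :: y :: rest).take mid)
    let right := pvJoinFailed ((x :: y :: rest).drop mid)
    match left with
    | none => right
    | some l =>
      match right with
      | none => some l
      | some r => some (l ++ "\n\n" ++ r)
termination_by xs => xs.length
decreasing_by
  · simp; omega
  · simp; omega

def generate_verify_endpoint_comments_py_alt (assertions : List (List (String × String))) : String :=
  if assertions = [] then "" else
  match pvJoinFailed assertions with
  | none => "All " ++ PySem.Int.toStr (assertions.length : Int) ++ " assertions passed"
  | some j => j

-- ===== PRECONDITION & SPEC =====
def Spec_generate_verify_endpoint_comments_py (assertions : List (List (String × String))) (out : String) : Prop := out = generate_verify_endpoint_comments_py_alt assertions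
instance (assertions : List (List (String × String))) (out : String) : Decidable (Spec_generate_verify_endpoint_comments_py assertions out) := by unfold Spec_generate_verify_endpoint_comments_py; infer_instance

-- ===== CLAIM (what is proved, stated in full; the proofs are below) =====
def Claim_equal_generate_verify_endpoint_comments_py : Prop := ∀ (assertions : List (List (String × String))), Dom_generate_verify_endpoint_comments_py assertions → Spec_generate_verify_endpoint_comments_py assertions (generate_verify_endpoint_comments_py assertions)

-- ===== LEMMAS AND PROOFS =====

def pvFail (a : List (String × String)) : Bool := !(List.lookup "result" a == some "pass")

def pvFmt (a : List (String × String)) : String :=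
  let title := (List.lookup "title" a).getD "Unknown assertion"
  if (List.lookup "error" a).getD "" ≠ "" then
    title ++ " -- error: " ++ (List.lookup "error" a).getD ""
  else
    title ++ " -- expected value: " ++ (List.lookup "expected" a).getD "N/A"
          ++ " and actual value: " ++ (List.lookup "actual" a).getD "N/A"

-- the joined failure report a list "should" produce
def pvSpecOf (L : List String) : Option String :=
  if L = [] then none else some (PySem.Str.join "\n\n" L)

theorem pvStrJoin_singleton (a : String) : PySem.Str.join "\n\n" [a] = a := by
  simp [PySem.Str.join, PySem.Chars.join_singleton]

theorem pvStrJoin_cons (a b : String) (l : List String) :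
    PySem.Str.join "\n\n" (a :: b :: l) = a ++ "\n\n" ++ PySem.Str.join "\n\n" (b :: l) := by
  apply String.toList_injective
  simp [PySem.Str.join, PySem.Chars.join_cons_cons]

theorem pvStrJoin_append (L1 L2 : List String) (h1 : L1 ≠ []) (h2 : L2 ≠ []) :
    PySem.Str.join "\n\n" (L1 ++ L2)
      = PySem.Str.join "\n\n" L1 ++ "\n\n" ++ PySem.Str.join "\n\n" L2 := by
  induction L1 with
  | nil => exact absurd rfl h1
  | cons a t ih =>
    cases t with
    | nil =>
      obtain ⟨b, tl, rfl⟩ := List.exists_cons_of_ne_nil h2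
      simp [pvStrJoin_cons, pvStrJoin_singleton]
    | cons c u =>
      have := ih (by simp)
      simp only [List.cons_append] at *
      rw [pvStrJoin_cons a c (u ++ L2), pvStrJoin_cons a c u, this]
      simp [String.append_assoc]

theorem pvSpecOf_append (L1 L2 : List String) :
    (match pvSpecOf L1 with
     | none => pvSpecOf L2
     | some l => match pvSpecOf L2 with
                 | none => some l
                 | some r => some (l ++ "\n\n" ++ r)) = pvSpecOf (L1 ++ L2) := by
  by_cases h1 : L1 = []
  · simp [h1, pvSpecOf]
  · by_cases h2 : L2 = []
    · simp [h1, h2, pvSpecOf]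
    · simp [pvSpecOf, h1, h2, pvStrJoin_append L1 L2 h1 h2]

-- B's divide and conquer computes the joined formatted failing assertions
theorem pvJoinFailed_single (a : List (String × String)) :
    pvJoinFailed [a] = pvSpecOf (([a].filter pvFail).map pvFmt) := by
  by_cases hp : (List.lookup "result" a == some "pass") = true
  · have hf : pvFail a = false := by simp [pvFail, hp]
    simp [pvJoinFailed, hp, hf, pvSpecOf]
  · have hf : pvFail a = true := by simp [pvFail]; simpa using hp
    simp [pvJoinFailed, hp, hf, pvSpecOf, pvFmt, pvStrJoin_singleton]
    split_ifs <;> rfl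

theorem pvJoinFailed_eq_aux (n : Nat) : ∀ xs : List (List (String × String)), xs.length ≤ n →
    pvJoinFailed xs = pvSpecOf ((xs.filter pvFail).map pvFmt) := by
  induction n with
  | zero =>
    intro xs h
    have : xs = [] := List.length_eq_zero_iff.mp (Nat.le_zero.mp h)
    simp [this, pvJoinFailed, pvSpecOf]
  | succ n ih =>
    intro xs h
    match xs with
    | [] => simp [pvJoinFailed, pvSpecOf]
    | [a] => exact pvJoinFailed_single a
    | x :: y :: rest =>
      rw [pvJoinFailed]
      have hlen : (x :: y :: rest).length = rest.length + 2 := by simp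
      have h1 : ((x :: y :: rest).take ((x :: y :: rest).length / 2)).length ≤ n := by
        simp at h ⊢; omega
      have h2 : ((x :: y :: rest).drop ((x :: y :: rest).length / 2)).length ≤ n := by
        simp at h ⊢; omega
      rw [ih _ h1, ih _ h2, pvSpecOf_append]
      congr 1
      rw [← List.map_append, ← List.filter_append, List.take_append_drop]

theorem pvJoinFailed_eq (xs : List (List (String × String))) :
    pvJoinFailed xs = pvSpecOf ((xs.filter pvFail).map pvFmt) :=
  pvJoinFailed_eq_aux xs.length xs le_rfl

-- A's accumulator loop builds exactly the filtered-formatted list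
theorem pvLoop_eq_filter_map (assertions : List (List (String × String))) :
    assertions.foldl (fun acc assertion =>
      if !(List.lookup "result" assertion == some "pass") then
        acc ++ [let title := (List.lookup "title" assertion).getD "Unknown assertion"
                if (List.lookup "error" assertion).getD "" ≠ "" then
                  title ++ " -- error: " ++ (List.lookup "error" assertion).getD ""
                else
                  title ++ " -- expected value: " ++ (List.lookup "expected" assertion).getD "N/A"
                        ++ " and actual value: " ++ (List.lookup "actual" assertion).getD "N/A"]
      else acc) [] =
    (assertions.filter pvFail).map pvFmt := by
  have h := PySem.List.foldl_append_if pvFail pvFmt assertions []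
  simpa [pvFail, pvFmt] using h

-- all(...) = true exactly when the list of failing assertions is empty
theorem pvAll_iff_filter_nil (assertions : List (List (String × String))) :
    assertions.all (fun a => List.lookup "result" a == some "pass") = true ↔
    assertions.filter pvFail = [] := by
  simp [List.all_eq_true, List.filter_eq_nil_iff, pvFail]

-- ===== VERDICT (by name: the statement is the Claim_ definition above) =====
theorem generate_verify_endpoint_comments_py_spec : Claim_equal_generate_verify_endpoint_comments_py := by
  intro assertions _
  unfold Spec_generate_verify_endpoint_comments_py
  unfold generate_verify_endpoint_comments_py generate_verify_endpoint_comments_py_alt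
  by_cases hnil : assertions = []
  · simp [hnil]
  · simp only [hnil, if_false]
    rw [pvJoinFailed_eq, pvLoop_eq_filter_map]
    by_cases hall : assertions.all (fun a => List.lookup "result" a == some "pass") = true
    · have hfil := (pvAll_iff_filter_nil assertions).mp hall
      simp [hall, hfil, pvSpecOf]
    · have hfil : assertions.filter pvFail ≠ [] := by
        intro h; exact hall ((pvAll_iff_filter_nil assertions).mpr h)
      have hmap : (assertions.filter pvFail).map pvFmt ≠ [] := by simpa using hfil
      simp [hall, pvSpecOf, hmap]
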